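-- pv_equiv track=rewrite | github.com/SethBushinsky/ocean-observations-PySOMFFN_UHM | feedforwardnetwork.py | GenerateYearMonthList
-- ===== SOURCE A (Python) =====
-- def GenerateYearMonthList(
--                           year_initial  = 1980, year_final  = 2023,  # FIXME based on v2024 datasets
--                           month_initial = 1,    month_final = 12):
--     '''
--         NAME        : GenerateYearMonthList
--         EDITED      : Daniel Burt       (VLIZ)      27.01.2025
--         DESCRIPTION : Generate a list of year-month date labels (inclusive)
--         ARGUMENTS   : year_initial      (int)           Initial year label
--                       year_final        (int)           Final year label
--                       month_initial     (int)           Initial month label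
--                       month_final       (int)           Final month label
--     '''
--
--     # instantiate list
--     yearmonth_labels = []
--
--     # determine time range
--     time_range = ((year_final + 1) - year_initial) * 12
--
--     # loop through time range
--     for t in range(time_range):
--
--         # instantiate temporary variables
--         year  = (t//12) + year_initial
--         month = (t%12) + 1
--
--         # evaluate label for label exceptions
--         if year == year_initial and month < month_initial:
--             continue
--         elif year == year_final and month > month_final:
--             continue
--         else:
--
--             # append valid labels to list
--             yearmonth_labels.append([year, month])
--
--     return yearmonth_labels
-- ===== SOURCE B (Python) =====
-- def GenerateYearMonthList(
--                           year_initial  = 1980, year_final  = 2023,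
--                           month_initial = 1,    month_final = 12):
--     yearmonth_labels = []
--     for year in range(year_initial, year_final + 1):
--         lo = month_initial if year == year_initial else 1
--         hi = month_final if year == year_final else 12
--         for month in range(max(lo, 1), min(hi, 12) + 1):
--             yearmonth_labels.append([year, month])
--     return yearmonth_labels
-- ===== Notes on version B (the rewrite author's own statement) =====
-- stated objective: simpler
-- what changed: Replaces the flat month-index loop with divmod and continue-guards by a nested year/month loop whose inner bounds are computed (clamped) directly, so no division, modulo or skip-guards remain.
import Mathlib
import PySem

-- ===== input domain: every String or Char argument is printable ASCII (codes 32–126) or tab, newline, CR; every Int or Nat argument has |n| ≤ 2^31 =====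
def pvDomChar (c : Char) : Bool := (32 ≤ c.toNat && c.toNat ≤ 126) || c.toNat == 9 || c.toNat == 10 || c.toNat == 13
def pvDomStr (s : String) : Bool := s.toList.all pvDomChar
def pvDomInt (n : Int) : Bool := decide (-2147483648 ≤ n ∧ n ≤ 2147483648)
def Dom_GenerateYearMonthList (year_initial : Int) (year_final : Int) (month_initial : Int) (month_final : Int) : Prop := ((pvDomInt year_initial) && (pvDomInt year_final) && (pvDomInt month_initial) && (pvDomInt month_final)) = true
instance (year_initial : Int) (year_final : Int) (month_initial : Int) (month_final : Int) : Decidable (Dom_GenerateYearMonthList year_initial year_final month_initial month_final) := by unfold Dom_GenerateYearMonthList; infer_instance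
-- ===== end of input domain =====

-- B replaces A's flat month-index loop (divmod + continue-guards) by a nested
-- year/month loop with clamped inner bounds; objective: simpler, same cost.

-- ===== PORT A =====
def GenerateYearMonthList (year_initial : Int) (year_final : Int) (month_initial : Int) (month_final : Int) : List (List Int) :=
  let time_range := ((year_final + 1) - year_initial) * 12
  (PySem.List.pyRange 0 time_range 1).foldl (fun yearmonth_labels t =>
    let year := PySem.Int.floordiv t 12 + year_initial
    let month := PySem.Int.mod t 12 + 1
    if year = year_initial ∧ month < month_initial then yearmonth_labels
    else if year = year_final ∧ month > month_final then yearmonth_labels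
    else yearmonth_labels ++ [[year, month]]) []

-- ===== PORT B =====
def GenerateYearMonthList_alt (year_initial : Int) (year_final : Int) (month_initial : Int) (month_final : Int) : List (List Int) :=
  (PySem.List.pyRange year_initial (year_final + 1) 1).foldl (fun yearmonth_labels year =>
    let lo := if year = year_initial then month_initial else 1
    let hi := if year = year_final then month_final else 12
    (PySem.List.pyRange (max lo 1) (min hi 12 + 1) 1).foldl
      (fun acc month => acc ++ [[year, month]]) yearmonth_labels) []

-- ===== PRECONDITION & SPEC =====
def Spec_GenerateYearMonthList (year_initial : Int) (year_final : Int) (month_initial : Int) (month_final : Int) (out : List (List Int)) : Prop := out = GenerateYearMonthList_alt year_initial year_final month_initial month_final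
instance (year_initial : Int) (year_final : Int) (month_initial : Int) (month_final : Int) (out : List (List Int)) : Decidable (Spec_GenerateYearMonthList year_initial year_final month_initial month_final out) := by unfold Spec_GenerateYearMonthList; infer_instance

-- ===== CLAIM (what is proved, stated in full; the proofs are below) =====
def Claim_equal_GenerateYearMonthList : Prop := ∀ (year_initial : Int) (year_final : Int) (month_initial : Int) (month_final : Int), Dom_GenerateYearMonthList year_initial year_final month_initial month_final → Spec_GenerateYearMonthList year_initial year_final month_initial month_final (GenerateYearMonthList year_initial year_final month_initial month_final)

-- ===== LEMMAS AND PROOFS =====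

-- the per-year month chunk both programs produce
def pvMonths (year_initial year_final month_initial month_final y : Int) : List (List Int) :=
  (PySem.List.pyRange (max (if y = year_initial then month_initial else 1) 1)
    (min (if y = year_final then month_final else 12) 12 + 1) 1).map (fun m => [y, m])

-- filtering a unit-step range by an interval is the clamped sub-range
lemma filter_pyRange_interval (lo hi : Int) : ∀ (n : Nat) (a b : Int), b - a = n →
    (PySem.List.pyRange a b 1).filter (fun m => decide (lo ≤ m ∧ m ≤ hi)) =
      PySem.List.pyRange (max a lo) (min b (hi + 1)) 1 := by
  intro n
  induction n with
  | zero =>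
      intro a b h
      rw [PySem.List.pyRange_one_eq_nil (by omega), PySem.List.pyRange_one_eq_nil (by omega)]
      rfl
  | succ k ih =>
      intro a b h
      rw [PySem.List.pyRange_one_cons (by omega), List.filter_cons]
      by_cases hp : lo ≤ a ∧ a ≤ hi
      · rw [if_pos (by simpa using hp), ih (a + 1) b (by omega),
          show max a lo = a from max_eq_left hp.1,
          show max (a + 1) lo = a + 1 from max_eq_left (by omega),
          PySem.List.pyRange_one_cons (by omega : a < min b (hi + 1))]
      · rw [if_neg (by simpa using hp), ih (a + 1) b (by omega)]
        rcases not_and_or.mp hp with hlo | hhi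
        · rw [show max a lo = lo from max_eq_right (by omega),
            show max (a + 1) lo = lo from max_eq_right (by omega)]
        · rw [PySem.List.pyRange_one_eq_nil (by omega : min b (hi + 1) ≤ max (a + 1) lo),
            PySem.List.pyRange_one_eq_nil (by omega : min b (hi + 1) ≤ max a lo)]

-- A's guard-filtered 12-month block for the (k+1)-st year is the clamped chunk
lemma block_eq (year_initial year_final month_initial month_final : Int) (k : Nat) :
    ((PySem.List.pyRange (12 * k) (12 * k + 12) 1).filter
        (fun t => decide (¬(PySem.Int.floordiv t 12 + year_initial = year_initial ∧
                            PySem.Int.mod t 12 + 1 < month_initial) ∧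
                          ¬(PySem.Int.floordiv t 12 + year_initial = year_final ∧
                            PySem.Int.mod t 12 + 1 > month_final)))).map
      (fun t => [PySem.Int.floordiv t 12 + year_initial, PySem.Int.mod t 12 + 1]) =
      pvMonths year_initial year_final month_initial month_final (year_initial + k) := by
  have hmap : PySem.List.pyRange (12 * k) (12 * k + 12) 1 =
      (PySem.List.pyRange 1 13 1).map (fun (m : Int) => 12 * (k : Int) + (m - 1)) := by
    rw [PySem.List.pyRange_one, PySem.List.pyRange_one]
    simp only [show ((12 * (k : Int) + 12) - 12 * k).toNat = 12 by omega,
      show ((13 : Int) - 1).toNat = 12 by omega, List.map_map]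
    refine List.map_congr_left ?_
    intro x _; simp only [Function.comp]; ring
  have hdiv : ∀ m : Int, 1 ≤ m → m ≤ 12 →
      PySem.Int.floordiv (12 * k + (m - 1)) 12 = k := by
    intro m h1 h2
    rw [PySem.Int.floordiv_eq_iff_of_pos (by omega)]; omega
  have hmod : ∀ m : Int, 1 ≤ m → m ≤ 12 →
      PySem.Int.mod (12 * k + (m - 1)) 12 = m - 1 := by
    intro m h1 h2
    have := PySem.Int.floordiv_mul_add_mod (12 * (k : Int) + (m - 1)) 12
    rw [hdiv m h1 h2] at this; omega
  rw [hmap, List.filter_map, List.map_map, pvMonths]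
  have hfc : (PySem.List.pyRange 1 13 1).filter
      ((fun t => decide (¬(PySem.Int.floordiv t 12 + year_initial = year_initial ∧
                            PySem.Int.mod t 12 + 1 < month_initial) ∧
                          ¬(PySem.Int.floordiv t 12 + year_initial = year_final ∧
                            PySem.Int.mod t 12 + 1 > month_final))) ∘ (fun (m : Int) => 12 * (k : Int) + (m - 1))) =
      (PySem.List.pyRange 1 13 1).filter
        (fun m => decide ((if (year_initial + (k : Int)) = year_initial then month_initial else 1) ≤ m ∧
          m ≤ (if (year_initial + (k : Int)) = year_final then month_final else 12))) := by
    refine List.filter_congr ?_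
    intro m hm
    rw [PySem.List.mem_pyRange_one] at hm
    simp only [Function.comp, hdiv m hm.1 (by omega), hmod m hm.1 (by omega),
      decide_eq_decide]
    constructor
    · rintro ⟨h1, h2⟩
      constructor
      · split_ifs with hy
        · by_contra hlt; exact h1 ⟨by omega, by omega⟩
        · omega
      · split_ifs with hy
        · by_contra hgt; exact h2 ⟨by omega, by omega⟩
        · omega
    · rintro ⟨h1, h2⟩
      constructor
      · rintro ⟨hy, hlt⟩
        rw [if_pos (by omega)] at h1; omega
      · rintro ⟨hy, hgt⟩
        rw [if_pos (by omega)] at h2; omega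
  rw [hfc, filter_pyRange_interval _ _ 12 1 13 (by omega)]
  rw [show max (1 : Int) (if (year_initial + (k : Int)) = year_initial then month_initial else 1) =
      max (if (year_initial + (k : Int)) = year_initial then month_initial else 1) 1 from max_comm _ _,
    show min (13 : Int) ((if (year_initial + (k : Int)) = year_final then month_final else 12) + 1) =
      min (if (year_initial + (k : Int)) = year_final then month_final else 12) 12 + 1 by omega]
  refine List.map_congr_left ?_
  intro m hm
  rw [PySem.List.mem_pyRange_one] at hm
  have h1 : (1 : Int) ≤ m := le_trans (le_max_right _ _) hm.1
  have h12 : m ≤ 12 := by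
    have := hm.2; have : m ≤ min (if (year_initial + (k : Int)) = year_final then month_final else 12) 12 := by omega
    omega
  simp only [Function.comp_apply]
  rw [hdiv m h1 h12, hmod m h1 h12]
  simp only [List.cons.injEq, and_true]; constructor <;> [ring; omega]

-- A's filtered index range, split into 12-month blocks, is B's flatMap over years
lemma range_blocks (year_initial year_final month_initial month_final : Int) : ∀ (k : Nat),
    ((PySem.List.pyRange 0 (12 * k) 1).filter
        (fun t => decide (¬(PySem.Int.floordiv t 12 + year_initial = year_initial ∧
                            PySem.Int.mod t 12 + 1 < month_initial) ∧
                          ¬(PySem.Int.floordiv t 12 + year_initial = year_final ∧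
                            PySem.Int.mod t 12 + 1 > month_final)))).map
      (fun t => [PySem.Int.floordiv t 12 + year_initial, PySem.Int.mod t 12 + 1]) =
      (PySem.List.pyRange year_initial (year_initial + k) 1).flatMap
        (pvMonths year_initial year_final month_initial month_final) := by
  intro k
  induction k with
  | zero => simp [PySem.List.pyRange_one_eq_nil]
  | succ k ih =>
      push_cast
      rw [show (12 * ((k : Int) + 1)) = 12 * (k : Int) + 12 by ring,
        PySem.List.pyRange_one_append 0 (12 * (k : Int)) (12 * (k : Int) + 12) (by omega) (by omega),
        List.filter_append, List.map_append, ih,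
        show year_initial + ((k : Int) + 1) = (year_initial + (k : Int)) + 1 by ring,
        PySem.List.pyRange_one_succ_right (by omega), List.flatMap_append,
        List.flatMap_singleton, block_eq year_initial year_final month_initial month_final k]

-- ===== VERDICT (by name: the statement is the Claim_ definition above) =====
theorem GenerateYearMonthList_spec : Claim_equal_GenerateYearMonthList := by
  intro yi yf mi mf _
  unfold Spec_GenerateYearMonthList GenerateYearMonthList GenerateYearMonthList_alt
  -- B side: inner append-loop is a map, outer loop is a flatMap
  have hB : ∀ (L : List Int),
      L.foldl (fun yearmonth_labels year =>
        (PySem.List.pyRange (max (if year = yi then mi else 1) 1)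
          (min (if year = yf then mf else 12) 12 + 1) 1).foldl
          (fun acc month => acc ++ [[year, month]]) yearmonth_labels) [] =
      L.flatMap (pvMonths yi yf mi mf) := by
    intro L
    have : ∀ (year : Int) (acc : List (List Int)),
        (PySem.List.pyRange (max (if year = yi then mi else 1) 1)
          (min (if year = yf then mf else 12) 12 + 1) 1).foldl
          (fun acc month => acc ++ [[year, month]]) acc =
        acc ++ pvMonths yi yf mi mf year := by
      intro year acc
      rw [pvMonths, PySem.List.foldl_append_singleton_eq_map]
    calc L.foldl _ ([] : List (List Int))
        = L.foldl (fun acc year => acc ++ pvMonths yi yf mi mf year) [] := by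
          refine PySem.List.foldl_congr_mem _ _ _ _ ?_
          intro acc year _; exact this year acc
      _ = L.flatMap (pvMonths yi yf mi mf) := by
          rw [PySem.List.foldl_append_eq_flatMap]; simp
  rw [hB]
  -- A side: the guarded append-loop is filter-then-map
  have hA : ∀ (L : List Int),
      L.foldl (fun yearmonth_labels t =>
        if PySem.Int.floordiv t 12 + yi = yi ∧ PySem.Int.mod t 12 + 1 < mi then yearmonth_labels
        else if PySem.Int.floordiv t 12 + yi = yf ∧ PySem.Int.mod t 12 + 1 > mf then yearmonth_labels
        else yearmonth_labels ++ [[PySem.Int.floordiv t 12 + yi, PySem.Int.mod t 12 + 1]]) [] =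
      (L.filter (fun t => decide (¬(PySem.Int.floordiv t 12 + yi = yi ∧ PySem.Int.mod t 12 + 1 < mi) ∧
                                  ¬(PySem.Int.floordiv t 12 + yi = yf ∧ PySem.Int.mod t 12 + 1 > mf)))).map
        (fun t => [PySem.Int.floordiv t 12 + yi, PySem.Int.mod t 12 + 1]) := by
    intro L
    rw [show (L.foldl (fun yearmonth_labels t =>
        if PySem.Int.floordiv t 12 + yi = yi ∧ PySem.Int.mod t 12 + 1 < mi then yearmonth_labels
        else if PySem.Int.floordiv t 12 + yi = yf ∧ PySem.Int.mod t 12 + 1 > mf then yearmonth_labels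
        else yearmonth_labels ++ [[PySem.Int.floordiv t 12 + yi, PySem.Int.mod t 12 + 1]]) []) =
      (L.foldl (fun yearmonth_labels t =>
        if (¬(PySem.Int.floordiv t 12 + yi = yi ∧ PySem.Int.mod t 12 + 1 < mi) ∧
            ¬(PySem.Int.floordiv t 12 + yi = yf ∧ PySem.Int.mod t 12 + 1 > mf)) then
          yearmonth_labels ++ [[PySem.Int.floordiv t 12 + yi, PySem.Int.mod t 12 + 1]]
        else yearmonth_labels) []) from by
        refine PySem.List.foldl_congr_mem _ _ _ _ ?_
        intro acc t _
        split_ifs <;> tauto]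
    rw [PySem.List.foldl_append_ite]; simp
  simp only [hA]
  -- connect via the block decomposition
  by_cases h : yf + 1 ≤ yi
  · rw [PySem.List.pyRange_one_eq_nil (show (yf + 1) ≤ yi from h),
      PySem.List.pyRange_one_eq_nil (by omega)]
    simp
  · rw [not_le] at h
    set k : Nat := ((yf + 1) - yi).toNat with hk
    have h12 : ((yf + 1) - yi) * 12 = 12 * (k : Int) := by
      rw [hk]; omega
    have hyk : yi + (k : Int) = yf + 1 := by rw [hk]; omega
    rw [h12, ← hyk]
    exact range_blocks yi yf mi mf k
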